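-- pv_equiv track=rewrite | github.com/XRSHEERAN/issues | spiral.py | ptlSpir
-- ===== SOURCE A (Python) =====
-- def ptlSpir(matrix,colnum,rawnum):
--     """
--     :type matrix: List[List[int]]
--     :type rNum: int
--     :type cNum: int
--     :rtype: list
--     """
--     raw,col=(len(matrix)-1,len(matrix[0])-1)
--     ret=[];
--     for i in range(colnum,col-colnum+1):
--         ret.append(matrix[rawnum][i])
--     for i in range(rawnum+1,raw-rawnum+1):
--         ret.append(matrix[i][col-colnum])
--     if (raw-rawnum) != rawnum:
--         for i in range(col-colnum-1,colnum-1,-1):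
--             ret.append(matrix[raw-rawnum][i])
--
--     if (col-colnum) != colnum:
--         for i in range(raw-rawnum-1,rawnum,-1):
--             ret.append(matrix[i][colnum])
--     return ret
-- ===== SOURCE B (Python) =====
-- def ptlSpir(matrix, colnum, rawnum):
--     raw, col = len(matrix) - 1, len(matrix[0]) - 1
--     top, bottom, left, right = rawnum, raw - rawnum, colnum, col - colnum
--     h, w = bottom - top + 1, right - left + 1
--     if h == 1:
--         count = w
--     elif w == 1:
--         count = h
--     else:
--         count = 2 * (h + w) - 4
--     ret = []
--     r, c, dr, dc = top, left, 0, 1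
--     for _ in range(count):
--         ret.append(matrix[r][c])
--         nr, nc = r + dr, c + dc
--         if not (top <= nr <= bottom and left <= nc <= right):
--             dr, dc = dc, -dr
--             nr, nc = r + dr, c + dc
--         r, c = nr, nc
--     return ret
-- ===== Notes on version B (the rewrite author's own statement) =====
-- stated objective: alternative
-- what changed: Replaces A's four separate edge loops (two index ranges up, two down, with two dedup guards) by a single position-stepping border walk: compute the exact perimeter element count, then repeatedly emit matrix[r][c], step in the current direction and turn right when the next step leaves the ring.
-- outside the precondition, e.g. on ptlSpir([[1, 2], [3, 4]], 0, 1): A returns [3, 4, 1], B returns []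
import Mathlib
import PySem

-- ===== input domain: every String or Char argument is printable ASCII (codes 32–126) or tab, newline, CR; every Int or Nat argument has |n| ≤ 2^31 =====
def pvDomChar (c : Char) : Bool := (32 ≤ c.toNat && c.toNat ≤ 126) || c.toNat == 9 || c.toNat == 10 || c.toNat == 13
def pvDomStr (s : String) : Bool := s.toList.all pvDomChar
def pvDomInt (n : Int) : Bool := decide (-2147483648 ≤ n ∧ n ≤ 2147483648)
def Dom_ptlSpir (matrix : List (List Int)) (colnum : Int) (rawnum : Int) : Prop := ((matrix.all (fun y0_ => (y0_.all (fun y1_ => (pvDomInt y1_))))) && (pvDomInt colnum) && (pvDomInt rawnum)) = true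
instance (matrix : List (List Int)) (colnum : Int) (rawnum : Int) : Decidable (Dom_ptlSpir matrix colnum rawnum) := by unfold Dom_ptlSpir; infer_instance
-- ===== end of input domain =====

-- B replaces A's four edge loops by one counted border walk that turns right at the ring's
-- corners (objective: alternative decomposition, same cost).

-- matrix[r][c]; under Pre_ the indices are always in range, so the defaults are never used
def pvGetM (m : List (List Int)) (r c : Int) : Int :=
  PySem.List.pyGetD (PySem.List.pyGetD m r []) c 0

-- ===== PORT A =====
def ptlSpir (matrix : List (List Int)) (colnum : Int) (rawnum : Int) : List Int :=
  let raw : Int := (matrix.length : Int) - 1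
  let col : Int := ((PySem.List.pyGetD matrix 0 []).length : Int) - 1
  let ret : List Int := (PySem.List.pyRange colnum (col - colnum + 1) 1).foldl
      (fun acc i => acc ++ [pvGetM matrix rawnum i]) []
  let ret := (PySem.List.pyRange (rawnum + 1) (raw - rawnum + 1) 1).foldl
      (fun acc i => acc ++ [pvGetM matrix i (col - colnum)]) ret
  let ret := if raw - rawnum ≠ rawnum then
      (PySem.List.pyRange (col - colnum - 1) (colnum - 1) (-1)).foldl
        (fun acc i => acc ++ [pvGetM matrix (raw - rawnum) i]) ret
    else ret
  let ret := if col - colnum ≠ colnum then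
      (PySem.List.pyRange (raw - rawnum - 1) rawnum (-1)).foldl
        (fun acc i => acc ++ [pvGetM matrix i colnum]) ret
    else ret
  ret

-- ===== PORT B =====
-- the counted walk: emit matrix[r][c], step by (dr,dc), turn right when leaving the ring
def pvWalk (m : List (List Int)) (top bot left right : Int) :
    Nat → Int → Int → Int → Int → List Int → List Int
  | 0, _, _, _, _, acc => acc
  | n + 1, r, c, dr, dc, acc =>
    let acc' := acc ++ [pvGetM m r c]
    if top ≤ r + dr ∧ r + dr ≤ bot ∧ left ≤ c + dc ∧ c + dc ≤ right then
      pvWalk m top bot left right n (r + dr) (c + dc) dr dc acc'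
    else
      pvWalk m top bot left right n (r + dc) (c + (-dr)) dc (-dr) acc'

def ptlSpir_alt (matrix : List (List Int)) (colnum : Int) (rawnum : Int) : List Int :=
  let raw : Int := (matrix.length : Int) - 1
  let col : Int := ((PySem.List.pyGetD matrix 0 []).length : Int) - 1
  let top := rawnum
  let bot := raw - rawnum
  let left := colnum
  let right := col - colnum
  let h := bot - top + 1
  let w := right - left + 1
  let count : Int := if h = 1 then w else if w = 1 then h else 2 * (h + w) - 4
  pvWalk matrix top bot left right count.toNat top left 0 1 []

-- ===== PRECONDITION & SPEC =====
-- Pre_ admits valid layers (the natural domain) and the degenerate parameters on which all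
-- of A's loops are empty; it excludes inputs on which A raises IndexError (empty matrix, a
-- row shorter than row 0, indices outside the matrix) and the remaining invalid layer
-- parameters, where A's partial output (via negative-index wraparound or half-empty loop
-- ranges) is an accident of its implementation.
def Pre_ptlSpir (matrix : List (List Int)) (colnum : Int) (rawnum : Int) : Prop :=
  matrix ≠ [] ∧
  (((∀ row ∈ matrix, (matrix.headD []).length ≤ row.length) ∧
    0 ≤ rawnum ∧ 0 ≤ colnum ∧
    2 * rawnum ≤ (matrix.length : Int) - 1 ∧
    2 * colnum ≤ ((matrix.headD []).length : Int) - 1) ∨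
   (((matrix.headD []).length : Int) - 1 < 2 * colnum ∧
    (matrix.length : Int) - 1 ≤ 2 * rawnum))

instance (matrix : List (List Int)) (colnum : Int) (rawnum : Int) : Decidable (Pre_ptlSpir matrix colnum rawnum) := by unfold Pre_ptlSpir; infer_instance

def pvWitness_ptlSpir : List (List Int) × Int × Int := ([[1, 2, 3], [4, 5, 6], [7, 8, 9]], 0, 0)

def Spec_ptlSpir (matrix : List (List Int)) (colnum : Int) (rawnum : Int) (out : List Int) : Prop := out = ptlSpir_alt matrix colnum rawnum
instance (matrix : List (List Int)) (colnum : Int) (rawnum : Int) (out : List Int) : Decidable (Spec_ptlSpir matrix colnum rawnum out) := by unfold Spec_ptlSpir; infer_instance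

-- ===== CLAIM (what is proved, stated in full; the proofs are below) =====
def Claim_equal_ptlSpir : Prop := ∀ (matrix : List (List Int)) (colnum : Int) (rawnum : Int), Dom_ptlSpir matrix colnum rawnum → Pre_ptlSpir matrix colnum rawnum → Spec_ptlSpir matrix colnum rawnum (ptlSpir matrix colnum rawnum)

-- ===== LEMMAS AND PROOFS =====

-- A's loop shape: appending one element per index equals map over the range
theorem pv_foldl_append_map (f : Int → Int) :
    ∀ (l : List Int) (acc : List Int),
      l.foldl (fun a i => a ++ [f i]) acc = acc ++ l.map f := by
  intro l
  induction l with
  | nil => intro acc; simp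
  | cons x xs ih => intro acc; simp [List.foldl_cons, ih, List.append_assoc]


-- one step of the walk, as a rewrite rule
theorem pvWalk_succ (m : List (List Int)) (T B L R : Int) (n : Nat) (r c dr dc : Int)
    (acc : List Int) :
    pvWalk m T B L R (n + 1) r c dr dc acc =
      if T ≤ r + dr ∧ r + dr ≤ B ∧ L ≤ c + dc ∧ c + dc ≤ R then
        pvWalk m T B L R n (r + dr) (c + dc) dr dc (acc ++ [pvGetM m r c])
      else
        pvWalk m T B L R n (r + dc) (c + -dr) dc (-dr) (acc ++ [pvGetM m r c]) := rfl

-- Phase 1: walking right along row `top` from column c up to `right`, then turning down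
theorem pv_goRight (m : List (List Int)) (T B L R : Int) (hTB : T ≤ B) (mf : Nat) :
    ∀ (n : Nat) (c : Int) (acc : List Int), L ≤ c → c ≤ R → (R - c).toNat = n →
      pvWalk m T B L R (n + mf + 1) T c 0 1 acc
        = pvWalk m T B L R mf (T + 1) R 1 0
            (acc ++ (PySem.List.pyRange c (R + 1) 1).map (fun i => pvGetM m T i)) := by
  intro n
  induction n with
  | zero =>
    intro c acc hLc hcR hn
    have hc : c = R := by omega
    subst hc
    rw [show (0 + mf + 1 : Nat) = mf + 1 from by omega]
    rw [pvWalk_succ]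
    simp only [add_zero, neg_zero, ← sub_eq_add_neg]
    rw [if_neg (by omega)]
    rw [PySem.List.pyRange_one_singleton]
    norm_num
  | succ k ih =>
    intro c acc hLc hcR hn
    have hcR' : c < R := by omega
    rw [show (k + 1 + mf + 1 : Nat) = (k + mf + 1) + 1 from by omega]
    rw [pvWalk_succ]
    simp only [add_zero, neg_zero, ← sub_eq_add_neg]
    rw [if_pos (by omega)]
    rw [ih (c + 1) (acc ++ [pvGetM m T c]) (by omega) (by omega) (by omega)]
    rw [PySem.List.pyRange_one_cons (by omega : c < R + 1)]
    simp [List.append_assoc]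

-- Phase 2: walking down along column `right` from row r to `bot`, then turning left
theorem pv_goDown (m : List (List Int)) (T B L R : Int) (hLR : L ≤ R) (mf : Nat) :
    ∀ (n : Nat) (r : Int) (acc : List Int), T ≤ r → r ≤ B → (B - r).toNat = n →
      pvWalk m T B L R (n + mf + 1) r R 1 0 acc
        = pvWalk m T B L R mf B (R - 1) 0 (-1)
            (acc ++ (PySem.List.pyRange r (B + 1) 1).map (fun i => pvGetM m i R)) := by
  intro n
  induction n with
  | zero =>
    intro r acc hTr hrB hn
    have hr : r = B := by omega
    subst hr
    rw [show (0 + mf + 1 : Nat) = mf + 1 from by omega]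
    rw [pvWalk_succ]
    simp only [add_zero, neg_zero, ← sub_eq_add_neg]
    rw [if_neg (by omega)]
    rw [PySem.List.pyRange_one_singleton]
    norm_num
  | succ k ih =>
    intro r acc hTr hrB hn
    rw [show (k + 1 + mf + 1 : Nat) = (k + mf + 1) + 1 from by omega]
    rw [pvWalk_succ]
    simp only [add_zero, neg_zero, ← sub_eq_add_neg]
    rw [if_pos (by omega)]
    rw [ih (r + 1) (acc ++ [pvGetM m r R]) (by omega) (by omega) (by omega)]
    rw [PySem.List.pyRange_one_cons (by omega : r < B + 1)]
    simp [List.append_assoc]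

-- Phase 3: walking left along row `bot` from column c down to `left`, then turning up
theorem pv_goLeft (m : List (List Int)) (T B L R : Int) (hTB : T ≤ B) (mf : Nat) :
    ∀ (n : Nat) (c : Int) (acc : List Int), L ≤ c → c ≤ R → (c - L).toNat = n →
      pvWalk m T B L R (n + mf + 1) B c 0 (-1) acc
        = pvWalk m T B L R mf (B - 1) L (-1) 0
            (acc ++ (PySem.List.pyRange c (L - 1) (-1)).map (fun i => pvGetM m B i)) := by
  intro n
  induction n with
  | zero =>
    intro c acc hLc hcR hn
    have hc : c = L := by omega
    rw [hc]
    rw [show (0 + mf + 1 : Nat) = mf + 1 from by omega]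
    rw [pvWalk_succ]
    simp only [add_zero, neg_zero, ← sub_eq_add_neg]
    rw [if_neg (by omega)]
    rw [PySem.List.pyRange_neg_one_cons (by omega : L - 1 < L),
        PySem.List.pyRange_neg_one_eq_nil (by omega : L - 1 ≤ L - 1)]
    norm_num
  | succ k ih =>
    intro c acc hLc hcR hn
    have hLc' : L < c := by omega
    rw [show (k + 1 + mf + 1 : Nat) = (k + mf + 1) + 1 from by omega]
    rw [pvWalk_succ]
    simp only [add_zero, neg_zero, ← sub_eq_add_neg]
    rw [if_pos (by omega)]
    rw [ih (c - 1) (acc ++ [pvGetM m B c]) (by omega) (by omega) (by omega)]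
    rw [PySem.List.pyRange_neg_one_cons (by omega : L - 1 < c)]
    simp [List.append_assoc, show c + -1 = c - 1 from by ring]

-- Phase 4: walking up along column `left` from row r down to `top + 1`; fuel runs out there
theorem pv_goUp (m : List (List Int)) (T B L R : Int) (hLR : L ≤ R) :
    ∀ (n : Nat) (r : Int) (acc : List Int), T ≤ r → r ≤ B → (r - T).toNat = n →
      pvWalk m T B L R n r L (-1) 0 acc
        = acc ++ (PySem.List.pyRange r T (-1)).map (fun i => pvGetM m i L) := by
  intro n
  induction n with
  | zero =>
    intro r acc hTr hrB hn
    have hr : r = T := by omega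
    rw [hr]
    rw [PySem.List.pyRange_neg_one_eq_nil (by omega : T ≤ T)]
    simp [pvWalk]
  | succ k ih =>
    intro r acc hTr hrB hn
    have hTr' : T < r := by omega
    rw [pvWalk_succ]
    simp only [add_zero, neg_zero, ← sub_eq_add_neg]
    rw [if_pos (by omega)]
    rw [ih (r - 1) (acc ++ [pvGetM m r L]) (by omega) (by omega) (by omega)]
    rw [PySem.List.pyRange_neg_one_cons (by omega : T < r)]
    simp [List.append_assoc, show r + -1 = r - 1 from by ring]

-- ===== VERDICT (by name: the statement is the Claim_ definition above) =====
theorem ptlSpir_spec : Claim_equal_ptlSpir := by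
  intro matrix colnum rawnum _hDom hPre
  obtain ⟨hne, hVE⟩ := hPre
  have hlenD : (PySem.List.pyGetD matrix 0 []).length = (matrix.headD []).length := by
    cases matrix with
    | nil => simp at hne
    | cons x xs => simp [PySem.List.pyGetD_zero_cons]
  simp only [Spec_ptlSpir, ptlSpir, ptlSpir_alt, pv_foldl_append_map]
  set T : Int := rawnum with hT
  set L : Int := colnum with hL
  set B : Int := (matrix.length : Int) - 1 - T with hB
  set R : Int := ((PySem.List.pyGetD matrix 0 []).length : Int) - 1 - L with hR
  rcases hVE with ⟨_hrect, hr0, hc0, hrB, hcB⟩ | ⟨hcE, hrE⟩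
  case inr =>
    -- degenerate parameters: every loop range of A is empty and B's count is ≤ 0
    have hRL : R < L := by rw [hR, hlenD]; omega
    have hBT : B ≤ T := by omega
    rw [PySem.List.pyRange_one_eq_nil (show R + 1 ≤ L from by omega),
        PySem.List.pyRange_one_eq_nil (show B + 1 ≤ T + 1 from by omega),
        PySem.List.pyRange_neg_one_eq_nil (show R - 1 ≤ L - 1 from by omega),
        PySem.List.pyRange_neg_one_eq_nil (show B - 1 ≤ T from by omega)]
    rw [show (if B - T + 1 = 1 then R - L + 1
              else if R - L + 1 = 1 then B - T + 1
              else 2 * (B - T + 1 + (R - L + 1)) - 4).toNat = 0 from by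
          split_ifs <;> omega]
    split_ifs <;> simp [pvWalk]
  case inl =>
  have hTB : T ≤ B := by omega
  have hLR : L ≤ R := by rw [hR, hlenD]; omega
  by_cases hhb : B = T
  · -- single-row layer: h = 1
    rw [if_neg (show ¬ (B ≠ T) from by omega)]
    rw [if_pos (show B - T + 1 = 1 from by omega)]
    rw [hhb]
    by_cases hwl : R = L
    · rw [if_neg (show ¬ (R ≠ L) from by omega)]
      rw [show (R - L + 1).toNat = 0 + 0 + 1 from by omega]
      rw [pv_goRight matrix T T L R le_rfl 0 0 L [] le_rfl hLR (by omega)]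
      rw [PySem.List.pyRange_one_eq_nil (le_refl (T + 1))]
      simp [pvWalk]
    · rw [if_pos (show R ≠ L from by omega)]
      rw [show (R - L + 1).toNat = (R - L).toNat + 0 + 1 from by omega]
      rw [pv_goRight matrix T T L R le_rfl 0 (R - L).toNat L [] le_rfl hLR rfl]
      rw [PySem.List.pyRange_one_eq_nil (le_refl (T + 1)),
          PySem.List.pyRange_neg_one_eq_nil (show T - 1 ≤ T from by omega)]
      simp [pvWalk]
  · by_cases hwl : R = L
    · -- single-column layer: w = 1
      rw [if_pos (show B ≠ T from by omega)]
      rw [if_neg (show ¬ (R ≠ L) from by omega)]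
      rw [if_neg (show ¬ (B - T + 1 = 1) from by omega)]
      rw [if_pos (show R - L + 1 = 1 from by omega)]
      rw [hwl]
      -- first walk step: the next cell right is outside the 1-wide ring, so turn down
      rw [show (B - T + 1).toNat = ((B - (T + 1)).toNat + 0 + 1) + 1 from by omega]
      rw [pvWalk_succ]
      rw [if_neg (by omega)]
      simp only [add_zero, neg_zero]
      rw [pv_goDown matrix T B L L (le_refl L) 0 (B - (T + 1)).toNat (T + 1)
            ([] ++ [pvGetM matrix T L]) (by omega) (by omega) rfl]
      rw [PySem.List.pyRange_one_singleton,
          PySem.List.pyRange_neg_one_eq_nil (le_refl (L - 1))]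
      simp [pvWalk, List.append_assoc]
    · -- full ring: h ≥ 2 and w ≥ 2
      rw [if_pos (show B ≠ T from by omega)]
      rw [if_pos (show R ≠ L from by omega)]
      rw [if_neg (show ¬ (B - T + 1 = 1) from by omega)]
      rw [if_neg (show ¬ (R - L + 1 = 1) from by omega)]
      rw [show (2 * ((B - T + 1) + (R - L + 1)) - 4).toNat
            = (R - L).toNat + ((B - (T + 1)).toNat + ((R - 1 - L).toNat + (B - 1 - T).toNat + 1) + 1) + 1
          from by omega]
      rw [pv_goRight matrix T B L R hTB _ (R - L).toNat L [] le_rfl hLR rfl]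
      rw [pv_goDown matrix T B L R hLR _ (B - (T + 1)).toNat (T + 1) _ (by omega) (by omega) rfl]
      rw [pv_goLeft matrix T B L R hTB _ (R - 1 - L).toNat (R - 1) _ (by omega) (by omega) rfl,
          pv_goUp matrix T B L R hLR (B - 1 - T).toNat (B - 1) _ (by omega) (by omega) rfl]
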